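-- pv_equiv track=rewrite | github.com/matajoh/aoc_2019 | day4.py | check_number_double
-- ===== SOURCE A (Python) =====
-- def check_number_double(number):
--     """ Check whether the digits increase monitonically, and if a digit
--     repeats exactly twice.
--     """
--     digits = str(number)
--     if len(digits) != 6:
--         return False
--
--     double = False
--     last = '0'
--     num_same = 0
--     for digit in digits:
--         if digit < last:
--             return False
--
--         if digit > last:
--             if num_same == 2:
--                 double = True
--
--             num_same = 0
--         else:
--             if num_same == 0:
--                 num_same = 2
--             else:
--                 num_same += 1
--
--         last = digit
--
--     if num_same == 2:
--         double = True
--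
--     return double
-- ===== SOURCE B (Python) =====
-- def check_number_double(number):
--     if not 100000 <= number <= 999999:
--         return False
--     d = str(number)
--     if any(x > y for x, y in zip(d, d[1:])):
--         return False
--     return any(d.count(c) == 2 for c in set(d))
-- ===== Notes on version B (the rewrite author's own statement) =====
-- stated objective: idiomatic
-- what changed: Replaces the single-pass state machine (last char, num_same counter, double flag, early return) by a numeric six-digit range guard, an adjacent-pairs zip comparison for monotonicity, and an occurrence-count test (some digit occurs exactly twice, valid because in a sorted string runs are contiguous).
import Mathlib
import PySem

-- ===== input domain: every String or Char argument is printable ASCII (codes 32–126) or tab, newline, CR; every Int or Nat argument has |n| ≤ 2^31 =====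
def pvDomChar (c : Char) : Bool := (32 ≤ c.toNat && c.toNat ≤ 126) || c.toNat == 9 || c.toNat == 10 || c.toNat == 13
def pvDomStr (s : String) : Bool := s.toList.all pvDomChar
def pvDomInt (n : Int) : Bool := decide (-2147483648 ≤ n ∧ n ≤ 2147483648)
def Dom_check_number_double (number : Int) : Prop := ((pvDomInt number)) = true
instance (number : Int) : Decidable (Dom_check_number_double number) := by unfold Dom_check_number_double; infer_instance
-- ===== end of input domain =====

-- B replaces A's single-pass state machine by a numeric range guard, an adjacent-pairs
-- monotonicity check and a digit-occurrence count (idiomatic; no speed claim).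

-- ===== PORT A =====
-- the for-loop of A with its early return, state (double, last, num_same)
def pvLoopA : List Char → Bool → Char → Int → Bool
  | [], double, _last, num_same => if num_same = 2 then true else double
  | digit :: rest, double, last, num_same =>
    if digit < last then false
    else if last < digit then
      pvLoopA rest (if num_same = 2 then true else double) digit 0
    else
      pvLoopA rest double digit (if num_same = 0 then 2 else num_same + 1)

def check_number_double (number : Int) : Bool :=
  let digits := PySem.Int.toStr number
  if PySem.Str.len digits ≠ 6 then false
  else pvLoopA digits.toList false '0' 0

-- ===== PORT B =====
-- 'd.count(c)' with c a single character is the character count (exact here: the set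
-- iterated over contains single characters only)
def check_number_double_alt (number : Int) : Bool :=
  if ¬ (100000 ≤ number ∧ number ≤ 999999) then false
  else
    let d := (PySem.Int.toStr number).toList
    if (d.zip (PySem.List.slice d (some 1) none)).any (fun p => p.2 < p.1) then false
    else (PySem.Set.ofList d).any (fun c => PySem.List.count d c == 2)

-- ===== PRECONDITION & SPEC =====
def Spec_check_number_double (number : Int) (out : Bool) : Prop := out = check_number_double_alt number
instance (number : Int) (out : Bool) : Decidable (Spec_check_number_double number out) := by unfold Spec_check_number_double; infer_instance

-- ===== CLAIM (what is proved, stated in full; the proofs are below) =====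
def Claim_equal_check_number_double : Prop := ∀ (number : Int), Dom_check_number_double number → Spec_check_number_double number (check_number_double number)

-- ===== LEMMAS AND PROOFS =====

-- str(m) for a natural m, as a structural recursion (proof-side mirror of Nat.toDigits)
def pvDecChars (m : Nat) : List Char :=
  if _h : m < 10 then [Nat.digitChar m]
  else pvDecChars (m / 10) ++ [Nat.digitChar (m % 10)]
decreasing_by exact Nat.div_lt_self (by omega) (by omega)

theorem pvCore_append (f : Nat) : ∀ (n : Nat) (ds : List Char),
    Nat.toDigitsCore 10 f n ds = Nat.toDigitsCore 10 f n [] ++ ds := by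
  induction f with
  | zero => intro n ds; simp [Nat.toDigitsCore]
  | succ f ih =>
    intro n ds
    simp only [Nat.toDigitsCore]
    by_cases h : n / 10 = 0
    · simp [h]
    · simp only [h, if_false]
      rw [ih (n / 10) (Nat.digitChar (n % 10) :: ds), ih (n / 10) [Nat.digitChar (n % 10)]]
      simp

theorem pvCore_eq_decChars (f : Nat) : ∀ (n : Nat), 0 < f → n < 10 ^ f →
    Nat.toDigitsCore 10 f n [] = pvDecChars n := by
  induction f with
  | zero => intro n h; omega
  | succ f ih =>
    intro n _ hlt
    simp only [Nat.toDigitsCore]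
    by_cases h : n / 10 = 0
    · have hn : n < 10 := by omega
      conv_rhs => rw [pvDecChars]
      simp [h, hn, Nat.mod_eq_of_lt hn]
    · have hn : ¬ n < 10 := by omega
      have hf : 0 < f := by
        by_contra hf0
        have : f = 0 := by omega
        subst this; simp at hlt; omega
      have hdiv : n / 10 < 10 ^ f := by
        rw [Nat.div_lt_iff_lt_mul (by omega)]
        calc n < 10 ^ (f + 1) := hlt
        _ = 10 ^ f * 10 := by ring
      simp only [h, if_false]
      rw [pvCore_append, ih (n / 10) hf hdiv]
      conv_rhs => rw [pvDecChars]
      simp [hn]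

theorem pvToDigits_eq (n : Nat) : Nat.toDigits 10 n = pvDecChars n := by
  have h1 : n < 10 ^ n := by
    calc n < 2 ^ n := Nat.lt_two_pow_self
    _ ≤ 10 ^ n := Nat.pow_le_pow_left (by omega) n
  have h2 : n < 10 ^ (n + 1) := lt_of_lt_of_le h1 (Nat.pow_le_pow_right (by omega) (by omega))
  exact pvCore_eq_decChars (n + 1) n (by omega) h2

theorem pvLen_decChars (m : Nat) : (pvDecChars m).length = Nat.log 10 m + 1 := by
  fun_induction pvDecChars m with
  | case1 m h => simp [Nat.log_eq_zero_iff.mpr (Or.inl h)]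
  | case2 m h ih =>
    have hlog : 0 < Nat.log 10 m := Nat.log_pos (by omega) (by omega)
    have := Nat.log_div_base 10 m
    simp [ih]
    omega

theorem pvHead_decChars (m : Nat) (hm : 0 < m) :
    ∃ h t, pvDecChars m = h :: t ∧ '0' < h := by
  fun_induction pvDecChars m with
  | case1 m h =>
    refine ⟨Nat.digitChar m, [], rfl, ?_⟩
    interval_cases m <;> first | omega | decide
  | case2 m h ih =>
    obtain ⟨c, t, heq, hc⟩ := ih (by omega)
    exact ⟨c, t ++ [Nat.digitChar (m % 10)], by rw [heq]; simp, hc⟩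

-- a head below the next element can be dropped from a sorted-prefix claim
theorem pvPairwise_iff (c d : Char) (rest : List Char) (hcd : c ≤ d) :
    List.Pairwise (· ≤ ·) (c :: d :: rest) ↔ List.Pairwise (· ≤ ·) (d :: rest) := by
  constructor
  · exact fun hp => (List.pairwise_cons.mp hp).2
  · intro hp
    constructor
    · intro e he
      rcases List.mem_cons.mp he with rfl | he'
      · exact hcd
      · exact le_trans hcd (List.rel_of_pairwise_cons hp he')
    · exact hp

-- A's double flag only survives while the scanned prefix stays sorted
theorem pvFlag : ∀ (L : List Char) (c : Char) (k : Int) (b : Bool),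
    pvLoopA L b c k = ((b && decide (List.Pairwise (· ≤ ·) (c :: L))) || pvLoopA L false c k) := by
  intro L
  induction L with
  | nil =>
    intro c k b
    simp only [pvLoopA, List.pairwise_cons, List.not_mem_nil, List.Pairwise.nil]
    by_cases hk : k = 2 <;> simp [hk]
  | cons d rest ih =>
    intro c k b
    by_cases hdc : d < c
    · have hnp : ¬ List.Pairwise (· ≤ ·) (c :: d :: rest) := by
        intro hp
        exact absurd (List.rel_of_pairwise_cons hp (by simp)) (not_le.mpr hdc)
      simp [pvLoopA, hdc, hnp]
    · have hcd : c ≤ d := le_of_not_gt hdc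
      have hq : decide (List.Pairwise (· ≤ ·) (c :: d :: rest))
          = decide (List.Pairwise (· ≤ ·) (d :: rest)) :=
        decide_eq_decide.mpr (pvPairwise_iff c d rest hcd)
      by_cases hlt : c < d
      · simp only [pvLoopA, hdc, if_false, hlt, if_true]
        rw [ih d 0 (if k = 2 then true else b), ih d 0 (if k = 2 then true else false), hq]
        generalize pvLoopA rest false d 0 = X
        generalize decide (List.Pairwise (· ≤ ·) (d :: rest)) = q
        by_cases hk : k = 2 <;> cases b <;> cases q <;> cases X <;> simp [hk]
      · simp only [pvLoopA, hdc, if_false, hlt]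
        rw [ih d (if k = 0 then 2 else k + 1) b, hq]

-- A's loop returns false as soon as the list (with the previous char in front) is unsorted
theorem pvLoopA_unsorted : ∀ (L : List Char) (c : Char) (k : Int) (b : Bool),
    ¬ List.Pairwise (· ≤ ·) (c :: L) → pvLoopA L b c k = false := by
  intro L
  induction L with
  | nil => intro c k b h; exact absurd (by simp) h
  | cons d rest ih =>
    intro c k b h
    by_cases hdc : d < c
    · simp [pvLoopA, hdc]
    · have hcd : c ≤ d := le_of_not_gt hdc
      have hrest : ¬ List.Pairwise (· ≤ ·) (d :: rest) := by
        intro hp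
        exact h ((pvPairwise_iff c d rest hcd).mpr hp)
      by_cases hlt : c < d
      · simp only [pvLoopA, hdc, if_false, hlt, if_true]; exact ih d 0 _ hrest
      · simp only [pvLoopA, hdc, if_false, hlt]; exact ih d _ b hrest

-- the pending-run encoding of A's num_same: a run of length 1 is stored as 0, longer runs as their length
def pvRep (k : Int) : Int := if k = 0 then 1 else k

-- A's loop on a sorted tail says: the pending run closes at length two, or some later
-- maximal run has length exactly two
theorem pvLoopA_sorted : ∀ (L : List Char) (c : Char) (k : Int),
    List.Pairwise (· ≤ ·) (c :: L) → (k = 0 ∨ 2 ≤ k) →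
    pvLoopA L false c k =
      decide (pvRep k + (List.count c L : Int) = 2 ∨ ∃ e ∈ L, e ≠ c ∧ List.count e L = 2) := by
  intro L
  induction L with
  | nil =>
    intro c k _ hk
    simp only [pvLoopA, List.count_nil, List.not_mem_nil, false_and, exists_false,
      or_false, Nat.cast_zero, add_zero]
    by_cases h2 : k = 2
    · subst h2; simp [pvRep]
    · rw [if_neg h2]
      symm
      rw [decide_eq_false_iff_not]
      unfold pvRep
      rcases hk with rfl | hge
      · norm_num
      · rw [if_neg (by omega)]; omega
  | cons d rest ih =>
    intro c k hp hk
    have hcd : c ≤ d := List.rel_of_pairwise_cons hp (by simp)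
    have hpd : List.Pairwise (· ≤ ·) (d :: rest) := (List.pairwise_cons.mp hp).2
    have hdge : ∀ e ∈ rest, d ≤ e := fun e he => List.rel_of_pairwise_cons hpd he
    have hdc : ¬ d < c := not_lt.mpr hcd
    by_cases hlt : c < d
    · -- strictly increasing step
      have hcne : c ∉ d :: rest := by
        intro hmem
        rcases List.mem_cons.mp hmem with rfl | h'
        · exact absurd hlt (lt_irrefl _)
        · exact absurd (lt_of_lt_of_le hlt (hdge c h')) (lt_irrefl _)
      have hcount0 : List.count c (d :: rest) = 0 := List.count_eq_zero.mpr hcne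
      simp only [pvLoopA, hdc, if_false, hlt, if_true]
      rw [show (if k = 2 then true else false) = decide (k = 2) from by
            by_cases h2 : k = 2 <;> simp [h2],
          pvFlag rest d 0 (decide (k = 2)), ih d 0 hpd (Or.inl rfl),
          decide_eq_true hpd, Bool.and_true, ← Bool.decide_or, decide_eq_decide]
      constructor
      · rintro (hk2 | h1 | ⟨e, he, hne, h2⟩)
        · left; rw [hcount0]; unfold pvRep; rw [if_neg (by omega)]; push_cast; omega
        · right
          refine ⟨d, by simp, (ne_of_lt hlt).symm, ?_⟩
          rw [List.count_cons, if_pos (by simp)]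
          unfold pvRep at h1; rw [if_pos rfl] at h1
          omega
        · right
          refine ⟨e, by simp [he], (ne_of_lt (lt_of_lt_of_le hlt (hdge e he))).symm, ?_⟩
          rw [List.count_cons, if_neg (by simpa using (Ne.symm hne))]
          exact h2
      · rintro (h1 | ⟨e, he, hne, h2⟩)
        · left
          rw [hcount0] at h1
          unfold pvRep at h1
          rcases hk with rfl | hge
          · rw [if_pos rfl] at h1; omega
          · rw [if_neg (by omega)] at h1; push_cast at h1; omega
        · rw [List.count_cons] at h2
          rcases List.mem_cons.mp he with rfl | he'
          · right; left
            rw [if_pos (by simp)] at h2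
            unfold pvRep; rw [if_pos rfl]; omega
          · by_cases hed : e = d
            · subst hed
              right; left
              rw [if_pos (by simp)] at h2
              unfold pvRep; rw [if_pos rfl]; omega
            · right; right
              refine ⟨e, he', fun h => hed h, ?_⟩
              rw [if_neg (by simpa using (Ne.symm hed))] at h2
              omega
    · -- equal step: c = d
      have hceq : c = d := le_antisymm hcd (not_lt.mp hlt)
      subst hceq
      have hk' : (2:Int) ≤ (if k = 0 then 2 else k + 1) := by
        rcases hk with rfl | h2
        · norm_num
        · rw [if_neg (by omega)]; omega
      have hrep' : pvRep (if k = 0 then 2 else k + 1) = pvRep k + 1 := by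
        unfold pvRep
        rcases hk with rfl | h2
        · simp
        · rw [if_neg (by omega), if_neg (by omega), if_neg (by omega)]
      simp only [pvLoopA, hdc, if_false]
      rw [ih c (if k = 0 then 2 else k + 1) hpd (Or.inr hk'), decide_eq_decide]
      rw [hrep']
      constructor
      · rintro (h1 | ⟨e, he, hne, h2⟩)
        · left
          rw [List.count_cons, if_pos (by simp)]
          push_cast
          omega
        · right
          refine ⟨e, by simp [he], hne, ?_⟩
          rw [List.count_cons, if_neg (by simpa using (Ne.symm hne))]
          exact h2
      · rintro (h1 | ⟨e, he, hne, h2⟩)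
        · left
          rw [List.count_cons, if_pos (by simp)] at h1
          push_cast at h1
          omega
        · rcases List.mem_cons.mp he with rfl | he'
          · exact absurd rfl hne
          · right
            refine ⟨e, he', hne, ?_⟩
            rw [List.count_cons, if_neg (by simpa using (Ne.symm hne))] at h2
            exact h2

-- B's adjacent-pairs test is exactly (non-)monotonicity
theorem pvZip_any (L : List Char) :
    (L.zip L.tail).any (fun p => p.2 < p.1) = !decide (List.Pairwise (· ≤ ·) L) := by
  induction L with
  | nil => simp
  | cons x t ih =>
    cases t with
    | nil => simp
    | cons y t' =>
      simp only [List.tail_cons, List.zip_cons_cons, List.any_cons] at ih ⊢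
      by_cases hxy : y < x
      · have hnp : ¬ List.Pairwise (· ≤ ·) (x :: y :: t') := by
          intro hp
          exact absurd (List.rel_of_pairwise_cons hp (by simp)) (not_le.mpr hxy)
        simp [hxy, hnp]
      · have hle : x ≤ y := le_of_not_gt hxy
        simp only [hxy, decide_false, Bool.false_or, ih]
        by_cases h : List.Pairwise (· ≤ ·) (y :: t') <;>
          simp [h, pvPairwise_iff x y t' hle]

theorem pvA_neg (n : Int) (hn : n < 0) : check_number_double n = false := by
  simp only [check_number_double]
  by_cases hlen : PySem.Str.len (PySem.Int.toStr n) ≠ 6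
  · rw [if_pos hlen]
  · rw [if_neg hlen, PySem.Int.toList_toStr,
      show PySem.Int.toChars n = '-' :: Nat.toDigits 10 n.natAbs from by
        simp [PySem.Int.toChars, hn]]
    simp [pvLoopA, show '-' < '0' from by decide]

theorem pvMain (n : Int) : check_number_double n = check_number_double_alt n := by
  rcases lt_or_ge n 0 with hneg | hpos
  · rw [pvA_neg n hneg]
    simp only [check_number_double_alt]
    rw [if_pos (by omega)]
  · -- n ≥ 0
    obtain ⟨m, rfl⟩ : ∃ m : Nat, n = (m : Int) := ⟨n.toNat, (Int.toNat_of_nonneg hpos).symm⟩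
    have hchars : PySem.Int.toChars (m : Int) = pvDecChars m := by
      simp only [PySem.Int.toChars]
      rw [if_neg (by omega), show ((m : Int)).toNat = m from rfl, pvToDigits_eq]
    have hlen : PySem.Str.len (PySem.Int.toStr (m : Int)) = ((pvDecChars m).length : Int) := by
      rw [PySem.Str.len_eq, PySem.Int.toList_toStr, hchars]
    by_cases hlog : Nat.log 10 m = 5
    · -- six digits: 100000 ≤ m ≤ 999999
      have hm0 : m ≠ 0 := by
        intro h; subst h; rw [Nat.log_zero_right] at hlog; omega
      have hlo : 100000 ≤ m := by
        have h := Nat.pow_log_le_self 10 hm0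
        rw [hlog] at h; norm_num at h; exact h
      have hhi : m < 1000000 := by
        have h := Nat.lt_pow_succ_log_self (b := 10) (by omega) m
        rw [hlog] at h; norm_num at h; exact h
      have hrange : 100000 ≤ (m : Int) ∧ (m : Int) ≤ 999999 := by omega
      obtain ⟨h, t, heq, hh⟩ := pvHead_decChars m (by omega)
      have hlist : (PySem.Int.toStr (m : Int)).toList = h :: t := by
        rw [PySem.Int.toList_toStr, hchars, heq]
      have hA : check_number_double (m : Int) = pvLoopA t false h 0 := by
        simp only [check_number_double]
        rw [if_neg (by rw [hlen, pvLen_decChars, hlog]; norm_num), hlist]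
        simp [pvLoopA, not_lt.mpr (le_of_lt hh), hh]
      have hB : check_number_double_alt (m : Int) =
          if ((h :: t).zip (h :: t).tail).any (fun p => p.2 < p.1) then false
          else (PySem.Set.ofList (h :: t)).any (fun c => PySem.List.count (h :: t) c == 2) := by
        simp only [check_number_double_alt]
        rw [if_neg (not_not_intro hrange), hlist, PySem.List.slice_from_one]
      rw [hA, hB]
      by_cases hsort : List.Pairwise (· ≤ ·) (h :: t)
      · rw [if_neg (by rw [pvZip_any]; simp [hsort]),
          pvLoopA_sorted t h 0 hsort (Or.inl rfl)]
        apply Bool.eq_iff_iff.mpr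
        simp only [decide_eq_true_eq, List.any_eq_true, PySem.Set.mem_ofList,
          PySem.List.count_eq, beq_iff_eq]
        constructor
        · rintro (h1 | ⟨e, he, hne, h2⟩)
          · refine ⟨h, by simp, ?_⟩
            rw [List.count_cons, if_pos (by simp)]
            unfold pvRep at h1; rw [if_pos rfl] at h1
            omega
          · refine ⟨e, by simp [he], ?_⟩
            rw [List.count_cons, if_neg (by simpa using (Ne.symm hne))]
            exact h2
        · rintro ⟨x, hx, h2⟩
          rw [List.count_cons] at h2
          rcases List.mem_cons.mp hx with rfl | hx'
          · left
            rw [if_pos (by simp)] at h2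
            unfold pvRep; rw [if_pos rfl]; omega
          · by_cases hxh : x = h
            · subst hxh
              left
              rw [if_pos (by simp)] at h2
              unfold pvRep; rw [if_pos rfl]; omega
            · right
              refine ⟨x, hx', fun hc => hxh hc, ?_⟩
              rw [if_neg (by simpa using (Ne.symm hxh))] at h2
              omega
      · rw [if_pos (by rw [pvZip_any]; simp [hsort]),
          pvLoopA_unsorted t h 0 false hsort]
    · -- not six digits: both sides are false
      have hA : check_number_double (m : Int) = false := by
        simp only [check_number_double]
        rw [if_pos (by rw [hlen, pvLen_decChars]; intro hc; apply hlog; omega)]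
      have hB : check_number_double_alt (m : Int) = false := by
        simp only [check_number_double_alt]
        rw [if_pos]
        intro ⟨h1, h2⟩
        exact hlog (Nat.log_eq_of_pow_le_of_lt_pow (by push_cast at h1 ⊢; omega)
          (by push_cast at h2 ⊢; omega))
      rw [hA, hB]

-- ===== VERDICT (by name: the statement is the Claim_ definition above) =====
theorem check_number_double_spec : Claim_equal_check_number_double := by
  intro number _
  unfold Spec_check_number_double
  exact pvMain number
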